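-- pv_equiv track=rewrite | github.com/miliar/Code_Jam_Webscraper | Solutions_python/Problem_156/631.py | minutes
-- ===== SOURCE A (Python) =====
-- def minutes(plates):
--    heighest = 1
--    best = 99999
--    while(heighest <= max(plates)):
--       mins = 0
--       for s in plates:
--          mins+= minsToMaxOf(s,heighest)
--       mins += heighest
--       if mins < best:
--          best = mins
--       heighest+=1
--    return best
--
-- def minsToMaxOf(stack, max):
--    return (stack-1)//max
-- ===== SOURCE B (Python) =====
-- def minutes(plates):
--     # Skip from one height to the next height at which the cost function
--     # h + sum((s-1)//h) can change, instead of evaluating it at every height: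
--     # for each plate, binary-search the last height with the same quotient.
--     M = max(plates)
--     best = 99999
--     h = 1
--     while h <= M:
--         cost = h + sum((s - 1) // h for s in plates)
--         best = min(best, cost)
--         nxt = M + 1
--         for s in plates:
--             v = s - 1
--             q = v // h
--             lo, hi = h, M
--             while lo < hi:
--                 mid = (lo + hi + 1) // 2
--                 if v // mid == q:
--                     lo = mid
--                 else:
--                     hi = mid - 1
--             nxt = min(nxt, lo + 1)
--         h = nxt
--     return best
-- ===== Notes on version B (the rewrite author's own statement) =====
-- stated objective: alternative
-- what changed: Instead of evaluating the cost h + sum((plate-1)//h) at every height h in 1..max(plates), B skips from each height to the next one at which some quotient (plate-1)//h changes, binary-searching per plate the last height with the same quotient; within such a block the cost is increasing in h, so only each block's first height is evaluated. Pre_ excludes only the empty list, on which A raises ValueError from max([]).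
-- outside the precondition, e.g. on minutes([]): A raises ValueError, B raises ValueError
import Mathlib
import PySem

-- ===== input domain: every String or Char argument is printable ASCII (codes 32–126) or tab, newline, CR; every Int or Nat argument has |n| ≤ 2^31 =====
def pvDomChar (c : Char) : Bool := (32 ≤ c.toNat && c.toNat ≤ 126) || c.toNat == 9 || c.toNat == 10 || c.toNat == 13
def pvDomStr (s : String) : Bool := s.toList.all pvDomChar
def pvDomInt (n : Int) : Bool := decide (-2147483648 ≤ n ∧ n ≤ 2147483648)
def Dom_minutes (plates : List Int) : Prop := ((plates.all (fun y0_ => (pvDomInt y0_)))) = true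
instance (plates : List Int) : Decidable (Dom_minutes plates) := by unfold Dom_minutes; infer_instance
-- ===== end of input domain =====

-- B skips from each height to the next height at which some quotient (s-1)//h
-- changes (found by binary search) instead of trying every height 1..max(plates)
-- (objective: alternative).

-- ===== PORT A =====
def minsToMaxOf (stack : Int) (max : Int) : Int := PySem.Int.floordiv (stack - 1) max

def loopA (plates : List Int) (M : Int) (heighest : Int) (best : Int) : Int :=
  if heighest ≤ M then
    let mins := plates.foldl (fun a s => a + minsToMaxOf s heighest) 0 + heighest
    loopA plates M (heighest + 1) (if mins < best then mins else best)
  else best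
termination_by (M + 1 - heighest).toNat
decreasing_by omega

-- A: while heighest <= max(plates); max(plates) is loop-invariant (Pre_ excludes []).
def minutes (plates : List Int) : Int :=
  loopA plates ((PySem.List.max? plates (fun x => x)).getD 0) 1 99999

-- ===== PORT B =====
-- the inner while: walk lo/hi toward the last x with v // x == q; the gap
-- hi - lo shrinks every step, so it also serves as the structural fuel
def bsearch (v q : Int) : Nat → Int → Int → Int
  | 0, lo, _hi => lo
  | Nat.succ fuel, lo, hi =>
    if lo < hi then
      let mid := PySem.Int.floordiv (lo + hi + 1) 2
      if PySem.Int.floordiv v mid = q then bsearch v q fuel mid hi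
      else bsearch v q fuel lo (mid - 1)
    else lo

-- nxt = min over plates of (block end + 1), seeded with M + 1
def nextH (plates : List Int) (M h : Int) : Int :=
  plates.foldl (fun n s => min n (bsearch (s - 1) (PySem.Int.floordiv (s - 1) h) (M - h).toNat h M + 1)) (M + 1)

-- binary-search midpoint bounds
theorem midB_bounds (lo hi : Int) (h : lo < hi) :
    lo < PySem.Int.floordiv (lo + hi + 1) 2 ∧ PySem.Int.floordiv (lo + hi + 1) 2 ≤ hi := by
  have hc := (PySem.Int.floordiv_eq_iff_of_pos (by norm_num : (0:Int) < 2)).mp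
    (rfl : PySem.Int.floordiv (lo + hi + 1) 2 = _)
  omega

-- the invariant of the inner binary search, cited by loopB's termination proof
theorem bsearch_spec (v q : Int) : ∀ (fuel : Nat) (lo hi : Int), lo ≤ hi → PySem.Int.floordiv v lo = q →
    lo ≤ bsearch v q fuel lo hi ∧ bsearch v q fuel lo hi ≤ hi ∧
      PySem.Int.floordiv v (bsearch v q fuel lo hi) = q := by
  intro fuel
  induction fuel with
  | zero => intro lo hi hle hq; exact ⟨le_refl _, hle, hq⟩
  | succ fuel ih =>
    intro lo hi hle hq
    rw [bsearch]
    by_cases hlt : lo < hi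
    · rw [if_pos hlt]
      have hm := midB_bounds lo hi hlt
      simp only
      split
      · rename_i hmid
        have := ih (PySem.Int.floordiv (lo + hi + 1) 2) hi (by omega) hmid
        exact ⟨by omega, this.2.1, this.2.2⟩
      · have := ih lo (PySem.Int.floordiv (lo + hi + 1) 2 - 1) (by omega) hq
        exact ⟨this.1, by omega, this.2.2⟩
    · rw [if_neg hlt]
      exact ⟨le_refl _, hle, hq⟩

-- cited by loopB's termination proof: the next height is strictly larger
theorem nextH_gt (plates : List Int) (M h : Int) (hM : h ≤ M) : h < nextH plates M h := by
  have aux : ∀ (L : List Int) (n : Int), h < n →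
      h < L.foldl (fun n s => min n (bsearch (s - 1) (PySem.Int.floordiv (s - 1) h) (M - h).toNat h M + 1)) n := by
    intro L
    induction L with
    | nil => intro n hn; simpa using hn
    | cons a t ih =>
      intro n hn
      simp only [List.foldl_cons]
      apply ih
      have := (bsearch_spec (a - 1) (PySem.Int.floordiv (a - 1) h) (M - h).toNat h M hM rfl).1
      omega
  exact aux plates (M + 1) (by omega)

-- cost = h + sum((s - 1) // h for s in plates)
def costB (plates : List Int) (h : Int) : Int :=
  h + plates.foldl (fun a s => a + PySem.Int.floordiv (s - 1) h) 0

def loopB (plates : List Int) (M : Int) (h : Int) (best : Int) : Int :=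
  if h ≤ M then
    let best' := min best (costB plates h)
    loopB plates M (nextH plates M h) best'
  else best
termination_by (M + 1 - h).toNat
decreasing_by
  have := nextH_gt plates M h (by assumption)
  omega

def minutes_alt (plates : List Int) : Int :=
  loopB plates ((PySem.List.max? plates (fun x => x)).getD 0) 1 99999

-- ===== PRECONDITION & SPEC =====
-- Python raises ValueError on max([]): Pre_ excludes the empty list only.
def Pre_minutes (plates : List Int) : Prop := plates ≠ []
instance (plates : List Int) : Decidable (Pre_minutes plates) := by unfold Pre_minutes; infer_instance
def pvWitness_minutes : List Int := [3, 1]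

def Spec_minutes (plates : List Int) (out : Int) : Prop := out = minutes_alt plates
instance (plates : List Int) (out : Int) : Decidable (Spec_minutes plates out) := by unfold Spec_minutes; infer_instance

-- ===== CLAIM (what is proved, stated in full; the proofs are below) =====
def Claim_equal_minutes : Prop := ∀ (plates : List Int), Dom_minutes plates → Pre_minutes plates → Spec_minutes plates (minutes plates)

-- ===== LEMMAS AND PROOFS =====

-- fold-min over a list of heights (proof-side characterization of both loops)
def gmin (k : Int → Int) (best : Int) (L : List Int) : Int :=
  L.foldl (fun b x => min b (k x)) best

theorem if_lt_eq_min (b c : Int) : (if c < b then c else b) = min b c := by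
  split <;> omega

theorem gmin_eq_seed (k : Int → Int) (L : List Int) :
    ∀ best, (∀ x ∈ L, best ≤ k x) → gmin k best L = best := by
  induction L with
  | nil => intro best _; simp [gmin]
  | cons a t ih =>
    intro best hb
    have ha : min best (k a) = best := by
      have := hb a List.mem_cons_self
      omega
    simp only [gmin, List.foldl_cons, ha]
    exact ih best fun x hx => hb x (List.mem_cons_of_mem _ hx)

theorem loopA_eq (plates : List Int) (M : Int) :
    ∀ h best, loopA plates M h best = gmin (costB plates) best (PySem.List.pyRange h (M + 1) 1) := by
  intro h best
  by_cases hle : h ≤ M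
  · rw [loopA, PySem.List.pyRange_one_cons (by omega : h < M + 1)]
    simp only [hle, if_true]
    rw [loopA_eq plates M (h + 1) _]
    simp only [gmin, List.foldl_cons]
    congr 1
    rw [if_lt_eq_min]
    congr 1
    simp only [costB, minsToMaxOf]
    omega
  · rw [loopA, PySem.List.pyRange_one_eq_nil (by omega : M + 1 ≤ h)]
    simp [hle, gmin]
termination_by h => (M + 1 - h).toNat
decreasing_by omega

-- facts about the jump target
theorem fold_nextH_le_seed (t : List Int) (M h : Int) : ∀ n : Int,
    t.foldl (fun n s => min n (bsearch (s - 1) (PySem.Int.floordiv (s - 1) h) (M - h).toNat h M + 1)) n ≤ n := by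
  induction t with
  | nil => intro n; simp
  | cons a t ih =>
    intro n
    simp only [List.foldl_cons]
    have := ih (min n (bsearch (a - 1) (PySem.Int.floordiv (a - 1) h) (M - h).toNat h M + 1))
    omega

theorem nextH_le_seed (plates : List Int) (M h : Int) : nextH plates M h ≤ M + 1 :=
  fold_nextH_le_seed plates M h (M + 1)

theorem nextH_le_mem (plates : List Int) (M h s : Int) (hs : s ∈ plates) :
    nextH plates M h ≤ bsearch (s - 1) (PySem.Int.floordiv (s - 1) h) (M - h).toNat h M + 1 := by
  unfold nextH
  generalize (M + 1 : Int) = n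
  induction plates generalizing n with
  | nil => simp at hs
  | cons a t ih =>
    simp only [List.foldl_cons]
    rcases List.mem_cons.mp hs with rfl | hs'
    · have := fold_nextH_le_seed t M h
        (min n (bsearch (s - 1) (PySem.Int.floordiv (s - 1) h) (M - h).toNat h M + 1))
      omega
    · exact ih hs' _

-- the number-theoretic core: level sets of x ↦ v // x (x ≥ 1) are intervals
theorem fdiv_const_between (v a x b : Int) (h1 : 1 ≤ a) (hax : a ≤ x) (hxb : x ≤ b)
    (heq : PySem.Int.floordiv v b = PySem.Int.floordiv v a) :
    PySem.Int.floordiv v x = PySem.Int.floordiv v a := by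
  have ha0 : (0 : Int) < a := by omega
  have hx0 : (0 : Int) < x := by omega
  have hb0 : (0 : Int) < b := by omega
  set q := PySem.Int.floordiv v a with hqdef
  have ha := (PySem.Int.floordiv_eq_iff_of_pos ha0).mp hqdef.symm
  have hb := (PySem.Int.floordiv_eq_iff_of_pos hb0).mp heq
  rw [PySem.Int.floordiv_eq_iff_of_pos hx0]
  rcases le_or_gt 0 q with hq | hq
  · exact ⟨by nlinarith [hb.1], by nlinarith [ha.2]⟩
  · exact ⟨by nlinarith [ha.1], by nlinarith [hb.2]⟩

theorem loopB_eq (plates : List Int) (M : Int) :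
    ∀ h best, 1 ≤ h → loopB plates M h best = gmin (costB plates) best (PySem.List.pyRange h (M + 1) 1) := by
  intro h best h1
  by_cases hle : h ≤ M
  · rw [loopB]
    simp only [hle, if_true]
    have hgt : h < nextH plates M h := nextH_gt plates M h hle
    have hleM : nextH plates M h ≤ M + 1 := nextH_le_seed plates M h
    rw [loopB_eq plates M (nextH plates M h) _ (by omega)]
    rw [PySem.List.pyRange_one_cons (by omega : h < M + 1)]
    simp only [gmin, List.foldl_cons]
    rw [PySem.List.pyRange_one_append (h + 1) (nextH plates M h) (M + 1) (by omega) hleM,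
      List.foldl_append]
    congr 1
    refine (gmin_eq_seed (costB plates) _ _ ?_).symm
    intro x hxmem
    rcases PySem.List.mem_pyRange_one.mp hxmem with ⟨hx1, hx2⟩
    have hsum : plates.foldl (fun a s => a + PySem.Int.floordiv (s - 1) x) 0 =
        plates.foldl (fun a s => a + PySem.Int.floordiv (s - 1) h) 0 := by
      apply PySem.List.foldl_congr_mem
      intro acc s hs
      congr 1
      have hspec := bsearch_spec (s - 1) (PySem.Int.floordiv (s - 1) h) (M - h).toNat h M hle rfl
      have hxle : x ≤ bsearch (s - 1) (PySem.Int.floordiv (s - 1) h) (M - h).toNat h M := by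
        have := nextH_le_mem plates M h s hs; omega
      exact fdiv_const_between (s - 1) h x _ h1 (by omega) hxle hspec.2.2
    simp only [costB, hsum]
    omega
  · rw [loopB]
    simp only [hle, if_false]
    rw [PySem.List.pyRange_one_eq_nil (by omega : M + 1 ≤ h)]
    simp [gmin]
termination_by h => (M + 1 - h).toNat
decreasing_by omega

theorem minutes_eq_alt (plates : List Int) : minutes plates = minutes_alt plates := by
  unfold minutes minutes_alt
  rw [loopA_eq, loopB_eq _ _ _ _ le_rfl]

-- ===== VERDICT (by name: the statement is the Claim_ definition above) =====
theorem minutes_spec : Claim_equal_minutes := by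
  intro plates _ _
  unfold Spec_minutes
  exact minutes_eq_alt plates
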